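-- pv_equiv track=rewrite | github.com/AlTrUiStIcPoTtErHeAd/SAFE-INTERN | utils/explanation_engine.py | explain_company
-- ===== SOURCE A (Python) =====
-- from typing import Dict, Any, List
--
-- def explain_company(details: List[str]) -> List[str]:
--     explanations = []
--
--     for d in details:
--         d = d.lower()
--
--         if "not reachable" in d:
--             explanations.append(
--                 "The company website could not be reached, which may limit independent verification."
--             )
--         elif "does not use https" in d:
--             explanations.append(
--                 "The company website does not use HTTPS, which is less common for established organizations."
--             )
--         elif "free email domain" in d:
--             explanations.append(
--                 "Communication uses a free email domain instead of an official company domain."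
--             )
--         elif "does not match website domain" in d:
--             explanations.append(
--                 "The email domain does not match the company website domain."
--             )
--
--     if not explanations:
--         return []
--
--     return explanations
-- ===== SOURCE B (Python) =====
-- _RULES = [
--     ("not reachable",
--      "The company website could not be reached, which may limit independent verification."),
--     ("does not use https",
--      "The company website does not use HTTPS, which is less common for established organizations."),
--     ("free email domain",
--      "Communication uses a free email domain instead of an official company domain."),
--     ("does not match website domain",
--      "The email domain does not match the company website domain."),
-- ]
--
-- def explain_company(details):
--     # Rule-major: one pass over the details per rule, filling empty slots so
--     # earlier (higher-priority) rules win; then compact the slot array.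
--     lows = [d.lower() for d in details]
--     assigned = [None] * len(lows)
--     for sub, msg in _RULES:
--         for i, low in enumerate(lows):
--             if assigned[i] is None and sub in low:
--                 assigned[i] = msg
--     return [m for m in assigned if m is not None]
-- ===== Notes on version B (the rewrite author's own statement) =====
-- stated objective: alternative
-- what changed: Flips the loop nesting: instead of an if/elif chain per detail, B makes one pass over the details per rule, filling a per-detail assignment slot only when still empty (so earlier rules keep priority) and finally compacts the slot array.
import Mathlib
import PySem

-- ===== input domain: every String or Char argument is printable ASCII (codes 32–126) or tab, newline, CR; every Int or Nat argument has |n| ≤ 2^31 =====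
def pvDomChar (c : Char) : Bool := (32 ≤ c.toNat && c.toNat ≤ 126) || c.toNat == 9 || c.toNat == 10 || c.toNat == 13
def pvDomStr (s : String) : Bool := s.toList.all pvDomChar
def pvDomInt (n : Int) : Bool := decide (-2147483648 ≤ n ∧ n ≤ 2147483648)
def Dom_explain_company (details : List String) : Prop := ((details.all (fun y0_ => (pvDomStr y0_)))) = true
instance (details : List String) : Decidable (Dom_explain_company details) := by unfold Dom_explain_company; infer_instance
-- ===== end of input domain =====

-- B flips the loop nesting: one pass over the details per rule, filling a per-detail slot
-- only when still empty (earlier rules keep priority), then compacting the slots (alternative).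


-- ===== PORT A =====
def explain_company (details : List String) : List String :=
  let explanations : List String :=
    details.foldl (fun explanations d0 =>
      let d := PySem.Str.lower d0
      if PySem.Str.isIn "not reachable" d then
        explanations ++ ["The company website could not be reached, which may limit independent verification."]
      else if PySem.Str.isIn "does not use https" d then
        explanations ++ ["The company website does not use HTTPS, which is less common for established organizations."]
      else if PySem.Str.isIn "free email domain" d then
        explanations ++ ["Communication uses a free email domain instead of an official company domain."]
      else if PySem.Str.isIn "does not match website domain" d then
        explanations ++ ["The email domain does not match the company website domain."]
      else explanations) []
  if explanations = [] then [] else explanations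

-- ===== PORT B =====
def pvRules : List (String × String) :=
  [("not reachable",
    "The company website could not be reached, which may limit independent verification."),
   ("does not use https",
    "The company website does not use HTTPS, which is less common for established organizations."),
   ("free email domain",
    "Communication uses a free email domain instead of an official company domain."),
   ("does not match website domain",
    "The email domain does not match the company website domain.")]

-- Source B's indexed inner loop "for i, low: if assigned[i] is None and sub in low" written as
-- the positionwise update of the slot list (same values at the same positions).
def explain_company_alt (details : List String) : List String :=
  let lows := details.map PySem.Str.lower
  let assigned := pvRules.foldl (fun assigned r =>
      List.zipWith (fun low a =>
        if a = none ∧ PySem.Str.isIn r.1 low then some r.2 else a) lows assigned)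
    (lows.map (fun _ => none))
  assigned.filterMap id

-- ===== PRECONDITION & SPEC =====
def Spec_explain_company (details : List String) (out : List String) : Prop := out = explain_company_alt details
instance (details : List String) (out : List String) : Decidable (Spec_explain_company details out) := by unfold Spec_explain_company; infer_instance

-- ===== CLAIM (what is proved, stated in full; the proofs are below) =====
def Claim_equal_explain_company : Prop := ∀ (details : List String), Dom_explain_company details → Spec_explain_company details (explain_company details)

-- ===== LEMMAS AND PROOFS =====

-- first rule (in rule order) whose substring occurs in the lowered detail
def pvFirstMessage (low : String) : List (String × String) → Option String
  | [] => none
  | (sub, msg) :: rest => if PySem.Str.isIn sub low then some msg else pvFirstMessage low rest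

lemma zipWith_map_self {α β γ : Type} (f : α → β → γ) (g : α → β) (l : List α) :
    List.zipWith f l (l.map g) = l.map (fun a => f a (g a)) := by
  induction l with
  | nil => rfl
  | cons h t ih => simp [ih]

-- B's rule-major fold, started from slots 'g low', fills each slot with g low
-- when present and otherwise with the first matching rule of rs.
lemma fold_rules_eq (rs : List (String × String)) (lows : List String)
    (g : String → Option String) :
    rs.foldl (fun assigned r =>
      List.zipWith (fun low a =>
        if a = none ∧ PySem.Str.isIn r.1 low then some r.2 else a) lows assigned)
      (lows.map g)
    = lows.map (fun low => (g low).elim (pvFirstMessage low rs) some) := by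
  induction rs generalizing g with
  | nil =>
    simp only [List.foldl_nil]
    congr 1; funext low; cases g low <;> simp [pvFirstMessage]
  | cons r rest ih =>
    rw [List.foldl_cons, zipWith_map_self, ih]
    congr 1; funext low
    cases hg : g low with
    | some m => simp
    | none => simp only [pvFirstMessage]; split <;> simp_all

lemma alt_eq (details : List String) :
    explain_company_alt details
    = (details.map (fun d => pvFirstMessage (PySem.Str.lower d) pvRules)).filterMap id := by
  have hz : explain_company_alt details
      = (pvRules.foldl (fun assigned r =>
          List.zipWith (fun low a =>
            if a = none ∧ PySem.Str.isIn r.1 low then some r.2 else a)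
          (details.map PySem.Str.lower) assigned)
          ((details.map PySem.Str.lower).map (fun _ => (none : Option String)))).filterMap id := rfl
  rw [hz, fold_rules_eq]
  simp [List.map_map, List.filterMap_map, Function.comp_def]

-- A's fold step equals appending the per-detail first-match result.
lemma step_eq (acc : List String) (d0 : String) :
    (let d := PySem.Str.lower d0
     if PySem.Str.isIn "not reachable" d then
       acc ++ ["The company website could not be reached, which may limit independent verification."]
     else if PySem.Str.isIn "does not use https" d then
       acc ++ ["The company website does not use HTTPS, which is less common for established organizations."]
     else if PySem.Str.isIn "free email domain" d then
       acc ++ ["Communication uses a free email domain instead of an official company domain."]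
     else if PySem.Str.isIn "does not match website domain" d then
       acc ++ ["The email domain does not match the company website domain."]
     else acc)
    = acc ++ (pvFirstMessage (PySem.Str.lower d0) pvRules).toList := by
  simp only [pvFirstMessage, pvRules]
  split_ifs <;> simp

lemma fold_eq (details : List String) (acc : List String) :
    details.foldl (fun explanations d0 =>
      let d := PySem.Str.lower d0
      if PySem.Str.isIn "not reachable" d then
        explanations ++ ["The company website could not be reached, which may limit independent verification."]
      else if PySem.Str.isIn "does not use https" d then
        explanations ++ ["The company website does not use HTTPS, which is less common for established organizations."]
      else if PySem.Str.isIn "free email domain" d then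
        explanations ++ ["Communication uses a free email domain instead of an official company domain."]
      else if PySem.Str.isIn "does not match website domain" d then
        explanations ++ ["The email domain does not match the company website domain."]
      else explanations) acc
    = acc ++ (details.map (fun d => pvFirstMessage (PySem.Str.lower d) pvRules)).filterMap id := by
  induction details generalizing acc with
  | nil => simp
  | cons h t ih =>
    rw [List.foldl_cons, step_eq, ih]
    cases hm : pvFirstMessage (PySem.Str.lower h) pvRules <;>
      simp [hm]

-- ===== VERDICT (by name: the statement is the Claim_ definition above) =====
theorem explain_company_spec : Claim_equal_explain_company := by
  intro details _
  unfold Spec_explain_company explain_company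
  rw [fold_eq, alt_eq]
  simp
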